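-- pv_equiv track=rewrite | github.com/zongqir/book | scripts/check-homogenization.py | extract_paragraph_rhythm
-- ===== SOURCE A (Python) =====
-- import unicodedata
--
-- def normalize_text(text: str) -> str:
--     lowered = text.lower()
--     kept: list[str] = []
--     for char in lowered:
--         category = unicodedata.category(char)
--         if category.startswith(("L", "N")):
--             kept.append(char)
--     return "".join(kept)
--
-- def paragraph_bucket(length: int) -> str:
--     if length <= 35:
--         return "S"
--     if length <= 90:
--         return "M"
--     if length <= 180:
--         return "L"
--     return "X"
--
-- def extract_paragraph_rhythm(lines: list[str]) -> tuple[str, ...]: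
--     paragraphs: list[str] = []
--     current: list[str] = []
--     for line in lines:
--         stripped = line.strip()
--         if not stripped:
--             if current:
--                 paragraphs.append(" ".join(current))
--                 current = []
--             continue
--         if stripped.startswith("## "):
--             if current:
--                 paragraphs.append(" ".join(current))
--                 current = []
--             continue
--         current.append(stripped)
--     if current:
--         paragraphs.append(" ".join(current))
--     buckets = [paragraph_bucket(len(normalize_text(paragraph))) for paragraph in paragraphs[:10]]
--     return tuple(buckets)
-- ===== SOURCE B (Python) =====
-- import unicodedata
--
-- def normalize_text(text: str) -> str:
--     lowered = text.lower()
--     kept: list[str] = []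
--     for char in lowered:
--         category = unicodedata.category(char)
--         if category.startswith(("L", "N")):
--             kept.append(char)
--     return "".join(kept)
--
-- def paragraph_bucket(length: int) -> str:
--     if length <= 35:
--         return "S"
--     if length <= 90:
--         return "M"
--     if length <= 180:
--         return "L"
--     return "X"
--
-- def _is_sep(line: str) -> bool:
--     s = line.strip()
--     return not s or s.startswith("## ")
--
-- def extract_paragraph_rhythm(lines: list[str]) -> tuple[str, ...]:
--     # group-first: find each maximal run of non-separator lines, join it
--     paragraphs: list[str] = []
--     i, n = 0, len(lines)
--     while i < n:
--         if _is_sep(lines[i]):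
--             i += 1
--             continue
--         j = i
--         while j < n and not _is_sep(lines[j]):
--             j += 1
--         paragraphs.append(" ".join(line.strip() for line in lines[i:j]))
--         i = j
--     return tuple(paragraph_bucket(len(normalize_text(p))) for p in paragraphs[:10])
-- ===== Notes on version B (the rewrite author's own statement) =====
-- stated objective: alternative
-- what changed: Replaces A's incremental current-accumulator/flush state machine with a group-first pass: scan for each maximal run of non-separator lines (a single is_sep predicate), join each run into a paragraph, then bucket the first 10 as before.
import Mathlib
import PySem

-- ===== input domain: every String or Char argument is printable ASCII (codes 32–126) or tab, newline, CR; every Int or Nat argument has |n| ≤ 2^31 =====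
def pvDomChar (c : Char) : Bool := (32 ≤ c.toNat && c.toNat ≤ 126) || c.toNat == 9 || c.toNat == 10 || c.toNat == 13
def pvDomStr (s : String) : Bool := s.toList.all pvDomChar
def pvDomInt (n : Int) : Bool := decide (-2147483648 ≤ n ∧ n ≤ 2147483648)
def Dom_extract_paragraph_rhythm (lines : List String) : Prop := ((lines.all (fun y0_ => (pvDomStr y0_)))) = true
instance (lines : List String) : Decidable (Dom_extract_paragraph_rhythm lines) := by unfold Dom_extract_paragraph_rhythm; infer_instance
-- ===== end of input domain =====

-- B replaces A's incremental flush state machine by a group-first pass (maximal runs of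
-- non-separator lines, each joined into one paragraph); alternative decomposition, not faster.

-- ===== PORT A =====
-- shared helper of both Pythons: unicodedata.category(c).startswith(("L","N")) is exactly
-- isalnum on the printable-ASCII domain Dom (letters ↦ L*, digits ↦ Nd, everything else neither)
def normalize_text (text : String) : String :=
  String.mk ((PySem.Str.lower text).toList.filter (fun c => PySem.Chars.isalnum c))

-- shared helper of both Pythons
def paragraph_bucket (length : Int) : String :=
  if length ≤ 35 then "S"
  else if length ≤ 90 then "M"
  else if length ≤ 180 then "L"
  else "X"

def stepA (st : List String × List String) (line : String) : List String × List String :=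
  let stripped := PySem.Str.strip line
  if stripped = "" then
    (if st.2 ≠ [] then (st.1 ++ [PySem.Str.join " " st.2], ([] : List String)) else st)
  else if PySem.Str.startswith stripped "## " then
    (if st.2 ≠ [] then (st.1 ++ [PySem.Str.join " " st.2], ([] : List String)) else st)
  else (st.1, st.2 ++ [stripped])

def extract_paragraph_rhythm (lines : List String) : List String :=
  let st := lines.foldl stepA (([] : List String), ([] : List String))
  let paragraphs := if st.2 ≠ [] then st.1 ++ [PySem.Str.join " " st.2] else st.1
  (PySem.List.slice paragraphs none (some 10)).map
    (fun p => paragraph_bucket (PySem.Str.len (normalize_text p)))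

-- ===== PORT B =====
def is_sep (line : String) : Bool :=
  let s := PySem.Str.strip line
  s = "" || PySem.Str.startswith s "## "

def paras : List String → List String
  | [] => []
  | l :: rest =>
    if h : is_sep l then paras rest
    else
      PySem.Str.join " " (((l :: rest).takeWhile (fun x => !is_sep x)).map PySem.Str.strip)
        :: paras ((l :: rest).dropWhile (fun x => !is_sep x))
termination_by ls => ls.length
decreasing_by
  · simp
  · simp only [List.dropWhile_cons]
    rw [if_pos (by simp [h])]
    have := List.length_dropWhile_le (fun x => !is_sep x) rest
    simp only [List.length_cons]; omega

def extract_paragraph_rhythm_alt (lines : List String) : List String :=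
  ((paras lines).take 10).map (fun p => paragraph_bucket (PySem.Str.len (normalize_text p)))

-- ===== PRECONDITION & SPEC =====
def Spec_extract_paragraph_rhythm (lines : List String) (out : List String) : Prop := out = extract_paragraph_rhythm_alt lines
instance (lines : List String) (out : List String) : Decidable (Spec_extract_paragraph_rhythm lines out) := by unfold Spec_extract_paragraph_rhythm; infer_instance

-- ===== CLAIM (what is proved, stated in full; the proofs are below) =====
def Claim_equal_extract_paragraph_rhythm : Prop := ∀ (lines : List String), Dom_extract_paragraph_rhythm lines → Spec_extract_paragraph_rhythm lines (extract_paragraph_rhythm lines)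

-- ===== LEMMAS AND PROOFS =====

def flushP (cur : List String) : List String :=
  if cur = [] then [] else [PySem.Str.join " " cur]

def gP : List String → List String → List String
  | cur, [] => flushP cur
  | cur, l :: ls => if is_sep l then flushP cur ++ gP [] ls else gP (cur ++ [PySem.Str.strip l]) ls

theorem stepA_sep (ps cur : List String) (line : String) (h : is_sep line = true) :
    stepA (ps, cur) line = (ps ++ flushP cur, []) := by
  simp only [is_sep, Bool.or_eq_true, decide_eq_true_eq] at h
  rcases h with h | h <;> by_cases hc : cur = [] <;>
    simp [stepA, flushP, h, hc] <;> simp_all [stepA]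

theorem stepA_nonsep (ps cur : List String) (line : String) (h : is_sep line = false) :
    stepA (ps, cur) line = (ps, cur ++ [PySem.Str.strip line]) := by
  simp only [is_sep, Bool.or_eq_false_iff, decide_eq_false_iff_not] at h
  obtain ⟨ha, hb⟩ := h
  simp at hb
  simp [stepA, ha, hb]

theorem foldl_stepA_eq (ls ps cur : List String) :
    (if (ls.foldl stepA (ps, cur)).2 ≠ [] then
        (ls.foldl stepA (ps, cur)).1 ++ [PySem.Str.join " " (ls.foldl stepA (ps, cur)).2]
      else (ls.foldl stepA (ps, cur)).1) = ps ++ gP cur ls := by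
  induction ls generalizing ps cur with
  | nil =>
    by_cases hc : cur = [] <;> simp [gP, flushP, hc]
  | cons l ls ih =>
    by_cases hs : is_sep l
    · simp only [List.foldl_cons, stepA_sep ps cur l hs]
      rw [ih, List.append_assoc]
      simp [gP, hs]
    · simp only [List.foldl_cons, stepA_nonsep ps cur l (by simpa using hs)]
      rw [ih]
      simp [gP, hs]

theorem g_eq (ls : List String) : ∀ cur : List String,
    gP cur ls = if cur = [] then paras ls
      else PySem.Str.join " " (cur ++ (ls.takeWhile (fun x => !is_sep x)).map PySem.Str.strip)
              :: paras (ls.dropWhile (fun x => !is_sep x)) := by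
  induction ls with
  | nil =>
    intro cur
    by_cases hc : cur = [] <;> simp [gP, flushP, paras, hc]
  | cons l ls ih =>
    intro cur
    by_cases hs : is_sep l
    · have hps : paras (l :: ls) = paras ls := by rw [paras]; simp [hs]
      by_cases hc : cur = [] <;>
        simp [gP, hs, flushP, hc, ih, hps, List.takeWhile_cons, List.dropWhile_cons]
    · have hps : paras (l :: ls) =
          PySem.Str.join " " (((l :: ls).takeWhile (fun x => !is_sep x)).map PySem.Str.strip)
            :: paras ((l :: ls).dropWhile (fun x => !is_sep x)) := by
        rw [paras]; simp [hs]
      by_cases hc : cur = [] <;>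
        simp [gP, hs, hc, ih, hps, List.takeWhile_cons, List.dropWhile_cons]

-- ===== VERDICT (by name: the statement is the Claim_ definition above) =====
theorem extract_paragraph_rhythm_spec : Claim_equal_extract_paragraph_rhythm := by
  intro lines _
  unfold Spec_extract_paragraph_rhythm extract_paragraph_rhythm extract_paragraph_rhythm_alt
  have h2 : gP [] lines = paras lines := by rw [g_eq]; simp
  simp only [foldl_stepA_eq, List.nil_append, h2]
  rw [PySem.List.slice_to]
  · rfl
  · norm_num
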